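-- pv_equiv track=rewrite | github.com/marcosfrancesquini/planilhas | geraplanilha.py | analise_por_bloco
-- ===== SOURCE A (Python) =====
-- from typing import List, Tuple, Dict
--
-- def analise_por_bloco(linhas: List[List[int]], K: int):
--     N = len(linhas)
--     C = N // K
--     r = N - C*K
--     dados: Dict[int, tuple[int, int, int]] = {}
--     if C == 0:
--         for n in range(100):
--             freq_incomp = 0
--             for i in range(0, r):
--                 freq_incomp += sum(1 for x in linhas[i] if x == n)
--             dados[n] = (0, 0, freq_incomp)
--         return C, r, dados
--
--     blocos_freq: List[List[int]] = []
--     for j in range(C):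
--         i0 = j*K
--         i1 = (j+1)*K
--         hist = [0]*100
--         for i in range(i0, i1):
--             for x in linhas[i]:
--                 if 0 <= x <= 99:
--                     hist[x] += 1
--         blocos_freq.append(hist)
--
--     hist_incomp = [0]*100
--     if r > 0:
--         i0 = C*K
--         i1 = N
--         for i in range(i0, i1):
--             for x in linhas[i]:
--                 if 0 <= x <= 99:
--                     hist_incomp[x] += 1
--
--     for n in range(100):
--         col = [blocos_freq[j][n] for j in range(C)]
--         max_c = max(col) if col else 0
--         min_c = min(col) if col else 0
--         dados[n] = (max_c, min_c, hist_incomp[n] if r > 0 else 0)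
--
--     return C, r, dados
-- ===== SOURCE B (Python) =====
-- from typing import List, Tuple, Dict
--
-- def analise_por_bloco(linhas: List[List[int]], K: int):
--     N = len(linhas)
--     C = N // K
--     r = N - C * K
--     # one pass: emit an occurrence pair (value, block) per in-range value
--     ocorr = []
--     for i, row in enumerate(linhas):
--         j = i // K
--         for x in row:
--             if 0 <= x <= 99:
--                 ocorr.append((x, j))
--     # sparse counter over (value, block) pairs
--     cnt: Dict[Tuple[int, int], int] = {}
--     for p in ocorr:
--         cnt[p] = cnt.get(p, 0) + 1
--     # group by value: counts in full blocks / remainder count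
--     per: Dict[int, List[int]] = {}
--     inc: Dict[int, int] = {}
--     for (x, j), c in cnt.items():
--         if j < C:
--             per[x] = per.get(x, []) + [c]
--         else:
--             inc[x] = c
--     dados: Dict[int, tuple] = {}
--     for n in range(100):
--         counts = per.get(n, [])
--         mx = max(counts, default=0)
--         mn = min(counts) if counts and len(counts) == C else 0
--         dados[n] = (mx, mn, inc.get(n, 0) if r > 0 else 0)
--     return C, r, dados
-- ===== Notes on version B (the rewrite author's own statement) =====
-- stated objective: faster
-- what changed: Replaces A's dense per-block histograms (and its special C==0 branch that rescans all rows 100 times, once per value) with a sparse pipeline: one pass emits (value, block) occurrence pairs, a counter dict tallies them, a group-by-value stage collects each value's per-block counts, and max/min/remainder are read off the sparse groups (min is 0 unless the value occurs in all C blocks).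
import Mathlib
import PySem

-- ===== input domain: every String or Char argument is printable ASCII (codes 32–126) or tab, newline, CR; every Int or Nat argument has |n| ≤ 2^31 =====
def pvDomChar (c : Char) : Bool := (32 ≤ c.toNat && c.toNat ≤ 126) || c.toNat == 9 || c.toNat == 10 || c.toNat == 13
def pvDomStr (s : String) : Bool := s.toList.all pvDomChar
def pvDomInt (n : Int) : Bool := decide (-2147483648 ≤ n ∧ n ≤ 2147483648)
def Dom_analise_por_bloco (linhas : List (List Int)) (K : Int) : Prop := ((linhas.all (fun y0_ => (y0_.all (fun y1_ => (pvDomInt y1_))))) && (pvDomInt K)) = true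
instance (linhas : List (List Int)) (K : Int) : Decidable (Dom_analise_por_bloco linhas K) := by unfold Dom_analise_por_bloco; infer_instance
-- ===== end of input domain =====

-- B replaces A's dense per-block histograms (and the C==0 branch's 100 rescans of all rows)
-- with a sparse pipeline: occurrence pairs -> (value, block) counter -> group by value -> max/min
-- (measured faster in a timing run); equal return value for every K ≠ 0 (K = 0 raises ZeroDivisionError in both).


-- ===== PORT A =====
-- shared inner statement of both Pythons: "for x in row: if 0 <= x <= 99: hist[x] += 1"
-- (guard ensures 0 ≤ x ≤ 99 < len hist, so pyGetD/pySetD are exact here)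
def pvAddRow (h : List Int) (row : List Int) : List Int :=
  row.foldl (fun h x =>
    if 0 ≤ x ∧ x ≤ 99 then PySem.List.pySetD h x (PySem.List.pyGetD h x 0 + 1) else h) h

-- "sum(1 for x in linhas[i] if x == n)"
def pvCount (row : List Int) (n : Int) : Int :=
  row.foldl (fun acc x => if x = n then acc + 1 else acc) 0

def analise_por_bloco (linhas : List (List Int)) (K : Int) : Int × Int × (List (Int × Int × Int × Int)) :=
  let N : Int := linhas.length
  let C : Int := PySem.Int.floordiv N K
  let r : Int := N - C * K
  if C = 0 then
    let dados : PySem.Dict Int (Int × Int × Int) :=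
      (PySem.List.pyRange 0 100 1).foldl (fun d n =>
        let freq : Int := (PySem.List.pyRange 0 r 1).foldl
          (fun acc i => acc + pvCount (PySem.List.pyGetD linhas i []) n) 0
        d.insert n (0, 0, freq)) PySem.Dict.empty
    (C, r, dados.items)
  else
    let blocos_freq : List (List Int) :=
      (PySem.List.pyRange 0 C 1).foldl (fun bs j =>
        let i0 := j * K
        let i1 := (j + 1) * K
        let hist := (PySem.List.pyRange i0 i1 1).foldl
          (fun h i => pvAddRow h (PySem.List.pyGetD linhas i [])) (List.replicate 100 0)
        bs ++ [hist]) []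
    let hist_incomp : List Int :=
      if r > 0 then
        (PySem.List.pyRange (C * K) N 1).foldl
          (fun h i => pvAddRow h (PySem.List.pyGetD linhas i [])) (List.replicate 100 0)
      else List.replicate 100 0
    let dados : PySem.Dict Int (Int × Int × Int) :=
      (PySem.List.pyRange 0 100 1).foldl (fun d n =>
        let col := (PySem.List.pyRange 0 C 1).map
          (fun j => PySem.List.pyGetD (PySem.List.pyGetD blocos_freq j []) n 0)
        let max_c := match PySem.List.max? col (fun x => x) with | some m => m | none => 0
        let min_c := match PySem.List.min? col (fun x => x) with | some m => m | none => 0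
        d.insert n (max_c, min_c, if r > 0 then PySem.List.pyGetD hist_incomp n 0 else 0)) PySem.Dict.empty
    (C, r, dados.items)

-- ===== PORT B =====
-- B-side helpers: the three stages of Source B, named
-- "ocorr": one pass emitting an occurrence pair (value, block) per in-range value
def pvOcorr (linhas : List (List Int)) (K : Int) : List (Int × Int) :=
  (PySem.List.enumerate linhas).foldl (fun acc p =>
    let j := PySem.Int.floordiv p.1 K
    p.2.foldl (fun acc x => if 0 ≤ x ∧ x ≤ 99 then acc ++ [(x, j)] else acc) acc) []

-- "cnt": sparse counter over the occurrence pairs (cnt[p] = cnt.get(p, 0) + 1)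
def pvCnt (linhas : List (List Int)) (K : Int) : PySem.Dict (Int × Int) Int :=
  (pvOcorr linhas K).foldl (fun d p => d.insert p (d.getD p 0 + 1)) PySem.Dict.empty

-- "per"/"inc": group the sparse counts by value (full blocks / remainder)
def pvGroup (C : Int) (l : List ((Int × Int) × Int)) :
    PySem.Dict Int (List Int) × PySem.Dict Int Int :=
  l.foldl (fun st q =>
    if q.1.2 < C then (st.1.modify q.1.1 [] (fun v => v ++ [q.2]), st.2)
    else (st.1, st.2.insert q.1.1 q.2)) (PySem.Dict.empty, PySem.Dict.empty)

def analise_por_bloco_alt (linhas : List (List Int)) (K : Int) : Int × Int × (List (Int × Int × Int × Int)) :=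
  let N : Int := linhas.length
  let C : Int := PySem.Int.floordiv N K
  let r : Int := N - C * K
  let pi := pvGroup C (pvCnt linhas K).items
  let per := pi.1
  let inc := pi.2
  let dados : PySem.Dict Int (Int × Int × Int) :=
    (PySem.List.pyRange 0 100 1).foldl (fun d n =>
      let counts := per.getD n []
      let mx := PySem.List.maxD counts (fun x => x) 0
      let mn := if counts ≠ [] ∧ (counts.length : Int) = C then
          (match PySem.List.min? counts (fun x => x) with | some m => m | none => 0)
        else 0
      d.insert n (mx, mn, if r > 0 then inc.getD n 0 else 0)) PySem.Dict.empty
  (C, r, dados.items)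

-- ===== PRECONDITION & SPEC =====
-- Pre_ excludes exactly K = 0, on which A (and B) raise ZeroDivisionError at N // K
def Pre_analise_por_bloco (linhas : List (List Int)) (K : Int) : Prop := K ≠ 0
instance (linhas : List (List Int)) (K : Int) : Decidable (Pre_analise_por_bloco linhas K) := by unfold Pre_analise_por_bloco; infer_instance
def pvWitness_analise_por_bloco : List (List Int) × Int := ([[1, 2], [2, 3], [5]], 2)

def Spec_analise_por_bloco (linhas : List (List Int)) (K : Int) (out : Int × Int × (List (Int × Int × Int × Int))) : Prop := out = analise_por_bloco_alt linhas K
instance (linhas : List (List Int)) (K : Int) (out : Int × Int × (List (Int × Int × Int × Int))) : Decidable (Spec_analise_por_bloco linhas K out) := by unfold Spec_analise_por_bloco; infer_instance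

-- ===== CLAIM (what is proved, stated in full; the proofs are below) =====
def Claim_equal_analise_por_bloco : Prop := ∀ (linhas : List (List Int)) (K : Int), Dom_analise_por_bloco linhas K → Pre_analise_por_bloco linhas K → Spec_analise_por_bloco linhas K (analise_por_bloco linhas K)

-- ===== LEMMAS AND PROOFS =====

-- ---------- A-side: histogram entries are row counts ----------
theorem pvAddRow_length (row : List Int) : ∀ (h : List Int), (pvAddRow h row).length = h.length := by
  induction row with
  | nil => intro h; simp [pvAddRow]
  | cons x t ih =>
    intro h
    show (pvAddRow (if 0 ≤ x ∧ x ≤ 99 then PySem.List.pySetD h x (PySem.List.pyGetD h x 0 + 1) else h) t).length = h.length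
    rw [ih]
    split
    · exact PySem.List.length_pySetD h x _
    · rfl

theorem pvAddRow_getD (row : List Int) : ∀ (h : List Int), h.length = 100 → ∀ (n : Nat), n ≤ 99 →
    (pvAddRow h row).getD n 0 = h.getD n 0 + (row.count ((n : Nat) : Int) : Int) := by
  induction row with
  | nil => intro h _ n _; simp [pvAddRow]
  | cons x t ih =>
    intro h hl n hn
    show (pvAddRow (if 0 ≤ x ∧ x ≤ 99 then PySem.List.pySetD h x (PySem.List.pyGetD h x 0 + 1) else h) t).getD n 0 = _
    by_cases hg : 0 ≤ x ∧ x ≤ 99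
    · rw [if_pos hg]
      obtain ⟨m, rfl⟩ : ∃ m : Nat, x = (m : Int) := ⟨x.toNat, (Int.toNat_of_nonneg hg.1).symm⟩
      rw [PySem.List.pySetD_natCast, PySem.List.pyGetD_natCast]
      have hml : m < h.length := by
        rw [hl]; omega
      have hset : ∀ (v : Int), (h.set m v).getD n 0 = if m = n then v else h.getD n 0 := by
        intro v
        rw [List.getD_eq_getElem?_getD, List.getElem?_set]
        by_cases hmn : m = n
        · rw [if_pos hmn, if_pos (hmn ▸ hml)]; simp [hmn]
        · rw [if_neg hmn, ← List.getD_eq_getElem?_getD]; simp [hmn]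
      rw [ih _ (by rw [List.length_set]; exact hl) n hn, hset, List.count_cons]
      by_cases hmn : m = n
      · subst hmn
        simp only [beq_self_eq_true, if_true]
        push_cast
        ring
      · have : ((m : Int) == ((n : Nat) : Int)) = false := by simp [hmn]
        simp only [if_neg hmn, this, Bool.false_eq_true, if_false]
        push_cast
        ring
    · rw [if_neg hg]
      rw [ih _ hl n hn, List.count_cons]
      have : (x == ((n : Nat) : Int)) = false := by
        simp only [beq_eq_false_iff_ne, ne_eq]
        intro he
        exact hg (by constructor <;> omega)
      simp only [this, Bool.false_eq_true, if_false]
      push_cast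
      ring

theorem pvHist_getD (rows : List (List Int)) : ∀ (h : List Int), h.length = 100 → ∀ (n : Nat), n ≤ 99 →
    (rows.foldl pvAddRow h).getD n 0
      = h.getD n 0 + ((rows.map (fun row => (row.count ((n : Nat) : Int) : Int))).sum) := by
  induction rows with
  | nil => intro h _ n _; simp
  | cons row rows ih =>
    intro h hl n hn
    rw [List.foldl_cons, ih _ (by rw [pvAddRow_length]; exact hl) n hn, pvAddRow_getD row h hl n hn]
    simp [add_assoc]

theorem pvCount_eq (row : List Int) (n : Int) : pvCount row n = (row.count n : Int) := by
  have := PySem.List.foldl_count_if (fun x => decide (x = n)) row 0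
  simpa [pvCount, List.count_eq_countP'] using this

-- an A-side range fold is the histogram of the rows it visits
theorem pvHistRange_getD (linhas : List (List Int)) (i0 i1 : Int) (m : Nat) (hm : m ≤ 99) :
    ((PySem.List.pyRange i0 i1 1).foldl
        (fun h i => pvAddRow h (PySem.List.pyGetD linhas i [])) (List.replicate 100 0)).getD m 0
      = ((PySem.List.pyRange i0 i1 1).map
          (fun i => ((PySem.List.pyGetD linhas i []).count ((m : Nat) : Int) : Int))).sum := by
  have h1 : (PySem.List.pyRange i0 i1 1).foldl
      (fun h i => pvAddRow h (PySem.List.pyGetD linhas i [])) (List.replicate 100 0)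
      = ((PySem.List.pyRange i0 i1 1).map (fun i => PySem.List.pyGetD linhas i [])).foldl
          pvAddRow (List.replicate 100 0) := by
    rw [List.foldl_map]
  rw [h1, pvHist_getD _ _ (List.length_replicate) m hm, List.getD_replicate 0 (by omega : m < 100),
    zero_add, List.map_map]
  rfl

-- filtering an index range by an interval condition keeps exactly the subrange
theorem pvFilter_range (a b lo hi : Int) (p : Int → Bool) (h1 : a ≤ lo) (h2 : lo ≤ hi) (h3 : hi ≤ b)
    (hp : ∀ i : Int, a ≤ i → i < b → (p i = true ↔ (lo ≤ i ∧ i < hi))) :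
    (PySem.List.pyRange a b 1).filter p = PySem.List.pyRange lo hi 1 := by
  rw [PySem.List.pyRange_one_append a lo b h1 (le_trans h2 h3),
      PySem.List.pyRange_one_append lo hi b h2 h3, List.filter_append, List.filter_append]
  have hnil1 : (PySem.List.pyRange a lo 1).filter p = [] := by
    rw [List.filter_eq_nil_iff]
    intro i hi'
    obtain ⟨hai, hil⟩ := PySem.List.mem_pyRange_one.mp hi'
    intro h
    exact absurd ((hp i hai (by omega)).mp h).1 (by omega)
  have hself : (PySem.List.pyRange lo hi 1).filter p = PySem.List.pyRange lo hi 1 := by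
    rw [List.filter_eq_self]
    intro i hi'
    obtain ⟨hli, hih⟩ := PySem.List.mem_pyRange_one.mp hi'
    exact (hp i (by omega) (by omega)).mpr ⟨hli, hih⟩
  have hnil2 : (PySem.List.pyRange hi b 1).filter p = [] := by
    rw [List.filter_eq_nil_iff]
    intro i hi'
    obtain ⟨hhi, hib⟩ := PySem.List.mem_pyRange_one.mp hi'
    intro h
    exact absurd ((hp i (by omega) hib).mp h).2 (by omega)
  rw [hnil1, hself, hnil2, List.nil_append, List.append_nil]

-- sum of a map over a filter = sum of the indicator map
theorem pvSum_filter (l : List Int) (p : Int → Prop) [DecidablePred p] (f : Int → Int) :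
    ((l.filter (fun i => decide (p i))).map f).sum = (l.map (fun i => if p i then f i else 0)).sum := by
  induction l with
  | nil => rfl
  | cons x t ih =>
    rw [List.filter_cons, List.map_cons]
    by_cases hx : p x
    · rw [if_pos (decide_eq_true hx), if_pos hx, List.map_cons, List.sum_cons, List.sum_cons, ih]
    · rw [if_neg (by simpa using hx), if_neg hx, List.sum_cons, ih, zero_add]

-- ---------- B-side: the occurrence list and its counts ----------
def pvOccF (linhas : List (List Int)) (K : Int) : List (Int × Int) :=
  (PySem.List.enumerate linhas).flatMap (fun p =>
    (p.2.filter (fun x => decide (0 ≤ x ∧ x ≤ 99))).map (fun x => (x, PySem.Int.floordiv p.1 K)))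

def pvCounts (linhas : List (List Int)) (K c n : Int) : List Int :=
  ((PySem.Set.ofList (pvOccF linhas K)).filter (fun k => k.1 == n && decide (k.2 < c))).map
    (fun k => (((pvOccF linhas K).count k : Nat) : Int))

theorem pvOcorr_eq (linhas : List (List Int)) (K : Int) :
    pvOcorr linhas K = pvOccF linhas K := by
  unfold pvOcorr pvOccF
  have h1 : (PySem.List.enumerate linhas).foldl (fun acc p =>
      let j := PySem.Int.floordiv p.1 K
      p.2.foldl (fun acc x => if 0 ≤ x ∧ x ≤ 99 then acc ++ [(x, j)] else acc) acc) []
      = (PySem.List.enumerate linhas).foldl (fun acc p =>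
          acc ++ (p.2.filter (fun x => decide (0 ≤ x ∧ x ≤ 99))).map
            (fun x => (x, PySem.Int.floordiv p.1 K))) [] := by
    apply PySem.List.foldl_congr_mem
    intro acc p _
    have := PySem.List.foldl_append_if (fun x => decide (0 ≤ x ∧ x ≤ 99))
      (fun x => (x, PySem.Int.floordiv p.1 K)) p.2 acc
    simp only [decide_eq_true_eq] at this
    exact this
  rw [h1, PySem.List.foldl_append_eq_flatMap, List.nil_append]

theorem pvCnt_eq (linhas : List (List Int)) (K : Int) :
    pvCnt linhas K = PySem.Dict.counter (pvOccF linhas K) := by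
  unfold pvCnt
  rw [pvOcorr_eq, PySem.Dict.foldl_insert_getD_add_one_eq_counter]

-- the grouping fold, first component: per-value list of full-block counts
theorem pvGroup_fold_per (c : Int) (l : List ((Int × Int) × Int)) :
    ∀ (st : PySem.Dict Int (List Int) × PySem.Dict Int Int) (n : Int),
    (l.foldl (fun st q =>
        if q.1.2 < c then (st.1.modify q.1.1 [] (fun v => v ++ [q.2]), st.2)
        else (st.1, st.2.insert q.1.1 q.2)) st).1.getD n []
      = st.1.getD n [] ++ (l.filter (fun q => q.1.1 == n && decide (q.1.2 < c))).map (fun q => q.2) := by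
  induction l with
  | nil => intro st n; simp
  | cons q t ih =>
    intro st n
    rw [List.foldl_cons, List.filter_cons]
    by_cases hb : q.1.2 < c
    · rw [if_pos hb, ih]
      by_cases hn : q.1.1 = n
      · have hcond : (q.1.1 == n && decide (q.1.2 < c)) = true := by simp [hn, hb]
        rw [hcond, if_pos rfl, List.map_cons, PySem.Dict.getD_modify, if_pos hn.symm, hn]
        simp
      · have hcond : (q.1.1 == n && decide (q.1.2 < c)) = false := by simp [hn]
        rw [hcond]
        simp only [Bool.false_eq_true, if_false]
        rw [PySem.Dict.getD_modify, if_neg (fun h => hn h.symm)]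
    · rw [if_neg hb, ih]
      have hcond : (q.1.1 == n && decide (q.1.2 < c)) = false := by simp [hb]
      rw [hcond]
      simp only [Bool.false_eq_true, if_false]

-- the grouping fold, second component: last remainder count written for the value
theorem pvGroup_fold_inc (c : Int) (l : List ((Int × Int) × Int)) :
    ∀ (st : PySem.Dict Int (List Int) × PySem.Dict Int Int) (n : Int),
    (l.foldl (fun st q =>
        if q.1.2 < c then (st.1.modify q.1.1 [] (fun v => v ++ [q.2]), st.2)
        else (st.1, st.2.insert q.1.1 q.2)) st).2.getD n 0
      = ((l.filter (fun q => q.1.1 == n && !decide (q.1.2 < c))).map (fun q => q.2)).foldl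
          (fun _ v => v) (st.2.getD n 0) := by
  induction l with
  | nil => intro st n; simp
  | cons q t ih =>
    intro st n
    rw [List.foldl_cons, List.filter_cons]
    by_cases hb : q.1.2 < c
    · rw [if_pos hb, ih]
      have hcond : (q.1.1 == n && !decide (q.1.2 < c)) = false := by simp [hb]
      rw [hcond]
      simp only [Bool.false_eq_true, if_false]
    · rw [if_neg hb, ih]
      by_cases hn : q.1.1 = n
      · have hcond : (q.1.1 == n && !decide (q.1.2 < c)) = true := by simp [hn, hb]
        rw [hcond, if_pos rfl, List.map_cons, List.foldl_cons,
          PySem.Dict.getD_insert, if_pos hn.symm]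
      · have hcond : (q.1.1 == n && !decide (q.1.2 < c)) = false := by simp [hn]
        rw [hcond]
        simp only [Bool.false_eq_true, if_false]
        rw [PySem.Dict.getD_insert, if_neg (fun h => hn h.symm)]

theorem pvPer_eq (linhas : List (List Int)) (K c n : Int) :
    (pvGroup c (pvCnt linhas K).items).1.getD n [] = pvCounts linhas K c n := by
  unfold pvGroup pvCounts
  rw [pvGroup_fold_per, PySem.Dict.getD_empty, List.nil_append, pvCnt_eq,
    PySem.Dict.items_counter, List.filter_map, List.map_map]
  rfl

-- every occurrence pair's block index comes from a real row index
theorem pvOcc_mem (linhas : List (List Int)) (K : Int) :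
    ∀ p ∈ pvOccF linhas K, ∃ i : Int, 0 ≤ i ∧ i < (linhas.length : Int) ∧
      p.2 = PySem.Int.floordiv i K := by
  intro p hp
  unfold pvOccF at hp
  rw [List.mem_flatMap] at hp
  obtain ⟨q, hq, hpq⟩ := hp
  rw [PySem.List.enumerate_eq_map_pyRange linhas [], PySem.List.len_eq, List.mem_map] at hq
  obtain ⟨i, hi, rfl⟩ := hq
  obtain ⟨hi0, hiN⟩ := PySem.List.mem_pyRange_one.mp hi
  rw [List.mem_map] at hpq
  obtain ⟨x, _, rfl⟩ := hpq
  exact ⟨i, hi0, hiN, rfl⟩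

theorem pvOcc_snd_pos (linhas : List (List Int)) (K : Int) (hK : 0 < K) :
    ∀ p ∈ pvOccF linhas K, 0 ≤ p.2 ∧ p.2 ≤ PySem.Int.floordiv (linhas.length : Int) K := by
  intro p hp
  obtain ⟨i, hi0, hiN, hpe⟩ := pvOcc_mem linhas K p hp
  have hmul := PySem.Int.floordiv_mul_add_mod (linhas.length : Int) K
  have hmod := PySem.Int.mod_lt (linhas.length : Int) hK
  constructor
  · rw [hpe]
    exact (PySem.Int.le_floordiv_iff_mul_le hK).mpr (by simpa)
  · rw [hpe]
    have : PySem.Int.floordiv i K < PySem.Int.floordiv (linhas.length : Int) K + 1 := by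
      rw [PySem.Int.floordiv_lt_iff_lt_mul hK]
      nlinarith
    omega

theorem pvOcc_snd_neg (linhas : List (List Int)) (K : Int) (hK : K < 0) :
    ∀ p ∈ pvOccF linhas K, ¬ (p.2 < PySem.Int.floordiv (linhas.length : Int) K) := by
  intro p hp
  obtain ⟨i, hi0, hiN, hpe⟩ := pvOcc_mem linhas K p hp
  have hmulN := PySem.Int.floordiv_mul_add_mod (linhas.length : Int) K
  have hmodN := PySem.Int.mod_neg_bounds (linhas.length : Int) hK
  have hmuli := PySem.Int.floordiv_mul_add_mod i K
  have hmodi := PySem.Int.mod_neg_bounds i hK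
  rw [hpe]
  intro hlt
  have h1 : PySem.Int.floordiv i K ≤ PySem.Int.floordiv (linhas.length : Int) K - 1 := by omega
  have h2 : (PySem.Int.floordiv (linhas.length : Int) K - 1) * K ≤ PySem.Int.floordiv i K * K :=
    mul_le_mul_of_nonpos_right h1 (le_of_lt hK)
  nlinarith

-- inc lookups are the remainder counts (K > 0)
theorem pvInc_eq (linhas : List (List Int)) (K : Int) (hK : 0 < K) (n : Int) :
    (pvGroup (PySem.Int.floordiv (linhas.length : Int) K) (pvCnt linhas K).items).2.getD n 0
      = (((pvOccF linhas K).count (n, PySem.Int.floordiv (linhas.length : Int) K) : Nat) : Int) := by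
  unfold pvGroup
  rw [pvGroup_fold_inc, PySem.Dict.getD_empty, pvCnt_eq, PySem.Dict.items_counter,
    List.filter_map, List.map_map]
  have hcongr : (PySem.Set.ofList (pvOccF linhas K)).filter
      ((fun q : (Int × Int) × Int => q.1.1 == n && !decide (q.1.2 < PySem.Int.floordiv (linhas.length : Int) K)) ∘
        (fun k => (k, ((pvOccF linhas K).count k : Int))))
      = (PySem.Set.ofList (pvOccF linhas K)).filter
          (fun k => k == (n, PySem.Int.floordiv (linhas.length : Int) K)) := by
    apply List.filter_congr
    intro k hk
    have hks := pvOcc_snd_pos linhas K hK k ((PySem.Set.mem_ofList _ _).mp hk)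
    apply Bool.eq_iff_iff.mpr
    simp only [Function.comp_apply, Bool.and_eq_true, beq_iff_eq, Bool.not_eq_true',
      decide_eq_false_iff_not, not_lt, Prod.ext_iff]
    constructor
    · rintro ⟨h1, h2⟩
      exact ⟨h1, by omega⟩
    · rintro ⟨h1, h2⟩
      exact ⟨h1, by omega⟩
  rw [hcongr, List.filter_beq]
  by_cases hmem : (n, PySem.Int.floordiv (linhas.length : Int) K) ∈ PySem.Set.ofList (pvOccF linhas K)
  · have hc1 : (PySem.Set.ofList (pvOccF linhas K)).count
        (n, PySem.Int.floordiv (linhas.length : Int) K) = 1 :=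
      List.count_eq_one_of_mem (PySem.Set.nodup_ofList _) hmem
    rw [hc1]
    rfl
  · have hc0 : (PySem.Set.ofList (pvOccF linhas K)).count
        (n, PySem.Int.floordiv (linhas.length : Int) K) = 0 :=
      List.count_eq_zero.mpr hmem
    have hocc : (pvOccF linhas K).count (n, PySem.Int.floordiv (linhas.length : Int) K) = 0 :=
      List.count_eq_zero.mpr (fun h => hmem ((PySem.Set.mem_ofList _ _).mpr h))
    rw [hc0, hocc]
    rfl

-- occurrence counts as indicator sums over row indices
theorem pvCountOcc (linhas : List (List Int)) (K n j : Int) (hn0 : 0 ≤ n) (hn99 : n ≤ 99) :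
    (((pvOccF linhas K).count (n, j) : Nat) : Int)
      = ((PySem.List.pyRange 0 (linhas.length : Int) 1).map
          (fun i => if PySem.Int.floordiv i K = j
            then ((PySem.List.pyGetD linhas i []).count n : Int) else 0)).sum := by
  unfold pvOccF
  rw [List.count_flatMap]
  have hmap : ((PySem.List.enumerate linhas).map
      ((List.count (n, j)) ∘ (fun p : Int × List Int =>
        (p.2.filter (fun x => decide (0 ≤ x ∧ x ≤ 99))).map (fun x => (x, PySem.Int.floordiv p.1 K)))))
      = (PySem.List.enumerate linhas).map
          (fun p => if PySem.Int.floordiv p.1 K = j then p.2.count n else 0) := by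
    apply List.map_congr_left
    intro p _
    simp only [Function.comp_apply]
    by_cases hj : PySem.Int.floordiv p.1 K = j
    · rw [if_pos hj, ← hj]
      have hinj : Function.Injective (fun x : Int => (x, PySem.Int.floordiv p.1 K)) := by
        intro a b hab
        simpa using congrArg Prod.fst hab
      have := List.count_map_of_injective (p.2.filter (fun x => decide (0 ≤ x ∧ x ≤ 99)))
        (fun x : Int => (x, PySem.Int.floordiv p.1 K)) hinj n
      rw [this, List.count_filter (by simp; omega)]
    · rw [if_neg hj, List.count_eq_zero]
      intro hmem
      rw [List.mem_map] at hmem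
      obtain ⟨x, _, hx⟩ := hmem
      exact hj (by simpa using congrArg Prod.snd hx)
  rw [hmap, Nat.cast_list_sum, List.map_map,
    PySem.List.enumerate_eq_map_pyRange linhas [], PySem.List.len_eq, List.map_map]
  apply congrArg
  apply List.map_congr_left
  intro i _
  simp only [Function.comp_apply]
  by_cases hj : PySem.Int.floordiv i K = j
  · rw [if_pos hj, if_pos hj]
  · rw [if_neg hj, if_neg hj]
    rfl

-- for K > 0 and 0 ≤ j < C: the occurrence count over block j is the block-range sum
theorem pvCO_block (linhas : List (List Int)) (K n j : Int) (hK : 0 < K)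
    (hn0 : 0 ≤ n) (hn99 : n ≤ 99) (hj0 : 0 ≤ j)
    (hjC : j < PySem.Int.floordiv (linhas.length : Int) K) :
    (((pvOccF linhas K).count (n, j) : Nat) : Int)
      = ((PySem.List.pyRange (j * K) ((j + 1) * K) 1).map
          (fun i => ((PySem.List.pyGetD linhas i []).count n : Int))).sum := by
  have hmul := PySem.Int.floordiv_mul_add_mod (linhas.length : Int) K
  have hmod := PySem.Int.mod_nonneg (linhas.length : Int) hK
  rw [pvCountOcc linhas K n j hn0 hn99, ← pvSum_filter _ (fun i => PySem.Int.floordiv i K = j),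
    pvFilter_range 0 (linhas.length : Int) (j * K) ((j + 1) * K)
      (fun i => decide (PySem.Int.floordiv i K = j))
      (by positivity) (by nlinarith) (by nlinarith)
      (fun i h0 hN => by
        simp only [decide_eq_true_eq]
        exact PySem.Int.floordiv_eq_iff_of_pos hK)]

-- for K > 0: the occurrence count at block C is the remainder-range sum
theorem pvCO_rem (linhas : List (List Int)) (K n : Int) (hK : 0 < K)
    (hn0 : 0 ≤ n) (hn99 : n ≤ 99) :
    (((pvOccF linhas K).count (n, PySem.Int.floordiv (linhas.length : Int) K) : Nat) : Int)
      = ((PySem.List.pyRange (PySem.Int.floordiv (linhas.length : Int) K * K) (linhas.length : Int) 1).map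
          (fun i => ((PySem.List.pyGetD linhas i []).count n : Int))).sum := by
  have hmul := PySem.Int.floordiv_mul_add_mod (linhas.length : Int) K
  have hmod := PySem.Int.mod_nonneg (linhas.length : Int) hK
  have hmod2 := PySem.Int.mod_lt (linhas.length : Int) hK
  have hC0 : 0 ≤ PySem.Int.floordiv (linhas.length : Int) K :=
    (PySem.Int.le_floordiv_iff_mul_le hK).mpr (by simp)
  rw [pvCountOcc linhas K n _ hn0 hn99,
    ← pvSum_filter _ (fun i => PySem.Int.floordiv i K = PySem.Int.floordiv (linhas.length : Int) K),
    pvFilter_range 0 (linhas.length : Int) (PySem.Int.floordiv (linhas.length : Int) K * K)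
      (linhas.length : Int) _
      (by positivity) (by omega) (le_refl _)
      (fun i h0 hN => by
        simp only [decide_eq_true_eq]
        rw [PySem.Int.floordiv_eq_iff_of_pos hK]
        constructor
        · rintro ⟨ha, _⟩; exact ⟨ha, hN⟩
        · rintro ⟨ha, _⟩; exact ⟨ha, by nlinarith⟩)]

-- ---------- extremal helpers ----------
theorem pvMax?_some (xs : List Int) (hne : xs ≠ []) :
    ∃ m, PySem.List.max? xs (fun x => x) = some m := by
  cases h : PySem.List.max? xs (fun x => x) with
  | none => exact absurd ((PySem.List.max?_eq_none_iff xs (fun x => x)).mp h) hne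
  | some m => exact ⟨m, rfl⟩

theorem pvMin?_some (xs : List Int) (hne : xs ≠ []) :
    ∃ m, PySem.List.min? xs (fun x => x) = some m := by
  cases h : PySem.List.min? xs (fun x => x) with
  | none => exact absurd ((PySem.List.min?_eq_none_iff xs (fun x => x)).mp h) hne
  | some m => exact ⟨m, rfl⟩

theorem pvMax_eq (col counts : List Int) (hcol : col ≠ [])
    (h1 : ∀ y ∈ col, 0 ≤ y) (h2 : ∀ y ∈ col, 0 < y → y ∈ counts)
    (h3 : ∀ y ∈ counts, y ∈ col ∧ 0 < y) :
    (match PySem.List.max? col (fun x => x) with | some m => m | none => 0)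
      = PySem.List.maxD counts (fun x => x) 0 := by
  obtain ⟨mA, hmA⟩ := pvMax?_some col hcol
  rw [hmA]
  unfold PySem.List.maxD
  cases hcs : counts with
  | nil =>
    show mA = (PySem.List.max? ([] : List Int) (fun x => x)).getD 0
    have hm0 : mA = 0 := by
      have hmem := PySem.List.max?_mem hmA
      have := h1 mA hmem
      by_contra hne
      have hpos : 0 < mA := by omega
      have := h2 mA hmem hpos
      rw [hcs] at this
      exact absurd this (List.not_mem_nil)
    rw [hm0]
    rfl
  | cons c0 ct =>
    rw [← hcs]
    obtain ⟨mB, hmB⟩ := pvMax?_some counts (by rw [hcs]; exact List.cons_ne_nil _ _)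
    rw [hmB, Option.getD_some]
    have hmBmem := PySem.List.max?_mem hmB
    obtain ⟨hmBcol, hmBpos⟩ := h3 mB hmBmem
    have hle1 : mB ≤ mA := PySem.List.max?_isMax hmA mB hmBcol
    have hle2 : mA ≤ mB := by
      have hmAmem := PySem.List.max?_mem hmA
      by_cases hpos : 0 < mA
      · exact PySem.List.max?_isMax hmB mA (h2 mA hmAmem hpos)
      · omega
    show mA = mB
    omega

theorem pvMin_full (col counts : List Int) (hcol : col ≠ []) (hcs : counts ≠ [])
    (h2 : ∀ y ∈ col, y ∈ counts) (h3 : ∀ y ∈ counts, y ∈ col) :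
    (match PySem.List.min? col (fun x => x) with | some m => m | none => 0)
      = (match PySem.List.min? counts (fun x => x) with | some m => m | none => 0) := by
  obtain ⟨mA, hmA⟩ := pvMin?_some col hcol
  obtain ⟨mB, hmB⟩ := pvMin?_some counts hcs
  rw [hmA, hmB]
  have h4 := PySem.List.min?_isMin hmA mB (h3 mB (PySem.List.min?_mem hmB))
  have h5 := PySem.List.min?_isMin hmB mA (h2 mA (PySem.List.min?_mem hmA))
  show mA = mB
  omega

theorem pvMin_zero (col : List Int) (h1 : ∀ y ∈ col, 0 ≤ y) (h0 : (0 : Int) ∈ col) :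
    (match PySem.List.min? col (fun x => x) with | some m => m | none => 0) = 0 := by
  obtain ⟨mA, hmA⟩ := pvMin?_some col (List.ne_nil_of_mem h0)
  rw [hmA]
  have h4 := PySem.List.min?_isMin hmA 0 h0
  have h5 := h1 mA (PySem.List.min?_mem hmA)
  show mA = 0
  omega

-- floordiv 0 K = 0 for K ≠ 0
theorem pvFd0 (K : Int) (hK : K ≠ 0) : PySem.Int.floordiv 0 K = 0 := by
  rcases lt_trichotomy K 0 with hneg | h0 | hpos
  · have hmul := PySem.Int.floordiv_mul_add_mod 0 K
    have hmod := PySem.Int.mod_neg_bounds 0 hneg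
    set q := PySem.Int.floordiv 0 K with hq
    rcases lt_trichotomy q 0 with h | h | h
    · nlinarith
    · exact h
    · nlinarith
  · exact absurd h0 hK
  · rw [PySem.Int.floordiv_eq_iff_of_pos hpos]
    omega

-- ---------- case lemmas ----------
set_option maxHeartbeats 1600000 in
theorem pvCase_C0 (linhas : List (List Int)) (K : Int) (hK : 0 < K)
    (hC : PySem.Int.floordiv (linhas.length : Int) K = 0) :
    analise_por_bloco linhas K = analise_por_bloco_alt linhas K := by
  have hbr := (PySem.Int.floordiv_eq_iff_of_pos hK).mp hC
  simp only [analise_por_bloco, analise_por_bloco_alt, hC, zero_mul, sub_zero, reduceIte, gt_iff_lt]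
  refine congrArg (fun z : PySem.Dict Int (Int × Int × Int) =>
    ((0 : Int), ((linhas.length : Int), z.items))) ?_
  apply PySem.List.foldl_congr_mem
  intro d n hn
  obtain ⟨hn0, hn100⟩ := PySem.List.mem_pyRange_one.mp hn
  apply congrArg
  -- B's counts list is empty: no occurrence pair has block index < 0
  have hcnil : pvCounts linhas K 0 n = [] := by
    unfold pvCounts
    rw [List.filter_eq_nil_iff.mpr, List.map_nil]
    intro k hk
    have h2 := (pvOcc_snd_pos linhas K hK k ((PySem.Set.mem_ofList _ _).mp hk)).1
    simp only [Bool.and_eq_true, beq_iff_eq, decide_eq_true_eq, not_and]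
    intro _
    omega
  rw [pvPer_eq linhas K 0 n, hcnil]
  have hinc := pvInc_eq linhas K hK n
  rw [hC] at hinc
  rw [hinc]
  by_cases hlen : 0 < (linhas.length : Int)
  · -- A's freq over all rows is the (n, 0) occurrence count
    have hfreq : (PySem.List.pyRange 0 (linhas.length : Int) 1).foldl
        (fun acc i => acc + pvCount (PySem.List.pyGetD linhas i []) n) 0
        = (((pvOccF linhas K).count (n, 0) : Nat) : Int) := by
      rw [pvCountOcc linhas K n 0 hn0 (by omega), PySem.List.foldl_add, zero_add]
      congr 1
      apply List.map_congr_left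
      intro i hi
      obtain ⟨hi0, hiN⟩ := PySem.List.mem_pyRange_one.mp hi
      rw [if_pos (by rw [PySem.Int.floordiv_eq_iff_of_pos hK]; constructor <;> omega)]
      exact pvCount_eq _ n
    rw [hfreq, if_pos hlen]
    rfl
  · have hnil : linhas = [] := by
      have : linhas.length = 0 := by omega
      exact List.eq_nil_of_length_eq_zero this
    subst hnil
    rw [if_neg hlen]
    have hr0 : PySem.List.pyRange 0 ((List.length ([] : List (List Int)) : Nat) : Int) 1 = [] := by
      rw [List.length_nil, Nat.cast_zero]
      exact PySem.List.pyRange_one_eq_nil (le_refl 0)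
    rw [hr0, List.foldl_nil]
    rfl

set_option maxHeartbeats 1600000 in
theorem pvCase_pos (linhas : List (List Int)) (K : Int) (hK : 0 < K)
    (hC : ¬ PySem.Int.floordiv (linhas.length : Int) K = 0) :
    analise_por_bloco linhas K = analise_por_bloco_alt linhas K := by
  have hC0 : 0 ≤ PySem.Int.floordiv (linhas.length : Int) K :=
    (PySem.Int.le_floordiv_iff_mul_le hK).mpr (by simp)
  have hCpos : 0 < PySem.Int.floordiv (linhas.length : Int) K := by omega
  simp only [analise_por_bloco, analise_por_bloco_alt, if_neg hC, gt_iff_lt]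
  rw [PySem.List.foldl_append_singleton_eq_map, List.nil_append]
  refine congrArg (fun z : PySem.Dict Int (Int × Int × Int) =>
    (PySem.Int.floordiv (linhas.length : Int) K,
      ((linhas.length : Int) - PySem.Int.floordiv (linhas.length : Int) K * K, z.items))) ?_
  apply PySem.List.foldl_congr_mem
  intro d n hn
  obtain ⟨hn0, hn100⟩ := PySem.List.mem_pyRange_one.mp hn
  apply congrArg
  obtain ⟨m, rfl⟩ : ∃ m : Nat, n = ((m : Nat) : Int) := ⟨n.toNat, (Int.toNat_of_nonneg hn0).symm⟩
  have hm99 : m ≤ 99 := by omega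
  -- the dense column of A is the list of occurrence counts over all blocks
  have hcol : (PySem.List.pyRange 0 (PySem.Int.floordiv (linhas.length : Int) K) 1).map
      (fun j => PySem.List.pyGetD (PySem.List.pyGetD
        ((PySem.List.pyRange 0 (PySem.Int.floordiv (linhas.length : Int) K) 1).map
          (fun j => (PySem.List.pyRange (j * K) ((j + 1) * K) 1).foldl
            (fun h i => pvAddRow h (PySem.List.pyGetD linhas i [])) (List.replicate 100 0))) j [])
        ((m : Nat) : Int) 0)
      = (PySem.List.pyRange 0 (PySem.Int.floordiv (linhas.length : Int) K) 1).map
          (fun j => (((pvOccF linhas K).count (((m : Nat) : Int), j) : Nat) : Int)) := by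
    apply List.map_congr_left
    intro j hj
    obtain ⟨hj0, hjC⟩ := PySem.List.mem_pyRange_one.mp hj
    rw [PySem.List.pyGetD_map_pyRange_of_nonneg _ _ _ _ hj0 hjC, PySem.List.pyGetD_natCast,
      pvHistRange_getD linhas _ _ m hm99,
      ← pvCO_block linhas K ((m : Nat) : Int) j hK hn0 (by omega) hj0 hjC]
  rw [hcol, pvPer_eq]
  -- shared facts about the sparse side
  have hSmem : ∀ k ∈ (PySem.Set.ofList (pvOccF linhas K)).filter
      (fun k => k.1 == ((m : Nat) : Int) && decide (k.2 < PySem.Int.floordiv (linhas.length : Int) K)),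
      k.1 = ((m : Nat) : Int) ∧ 0 ≤ k.2 ∧ k.2 < PySem.Int.floordiv (linhas.length : Int) K ∧
        k ∈ pvOccF linhas K := by
    intro k hk
    rw [List.mem_filter] at hk
    obtain ⟨hkS, hcond⟩ := hk
    simp only [Bool.and_eq_true, beq_iff_eq, decide_eq_true_eq] at hcond
    have hkocc := (PySem.Set.mem_ofList _ _).mp hkS
    exact ⟨hcond.1, (pvOcc_snd_pos linhas K hK k hkocc).1, hcond.2, hkocc⟩
  have hmemcounts : ∀ j : Int, 0 ≤ j → j < PySem.Int.floordiv (linhas.length : Int) K →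
      (((m : Nat) : Int), j) ∈ pvOccF linhas K →
      (((pvOccF linhas K).count (((m : Nat) : Int), j) : Nat) : Int)
        ∈ pvCounts linhas K (PySem.Int.floordiv (linhas.length : Int) K) ((m : Nat) : Int) := by
    intro j hj0 hjC hjm
    unfold pvCounts
    rw [List.mem_map]
    refine ⟨(((m : Nat) : Int), j), ?_, rfl⟩
    rw [List.mem_filter]
    exact ⟨(PySem.Set.mem_ofList _ _).mpr hjm, by simp [hjC]⟩
  have hcountsmem : ∀ y ∈ pvCounts linhas K (PySem.Int.floordiv (linhas.length : Int) K) ((m : Nat) : Int),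
      ∃ j : Int, 0 ≤ j ∧ j < PySem.Int.floordiv (linhas.length : Int) K ∧
        y = (((pvOccF linhas K).count (((m : Nat) : Int), j) : Nat) : Int) ∧
        (((m : Nat) : Int), j) ∈ pvOccF linhas K := by
    intro y hy
    unfold pvCounts at hy
    rw [List.mem_map] at hy
    obtain ⟨k, hk, rfl⟩ := hy
    obtain ⟨hk1, hk2, hk3, hk4⟩ := hSmem k hk
    refine ⟨k.2, hk2, hk3, ?_, ?_⟩
    · rw [show ((((m : Nat) : Int)), k.2) = k from by rw [← hk1]]
    · rw [show ((((m : Nat) : Int)), k.2) = k from by rw [← hk1]]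
      exact hk4
  have hcolform : ∀ y ∈ (PySem.List.pyRange 0 (PySem.Int.floordiv (linhas.length : Int) K) 1).map
      (fun j => (((pvOccF linhas K).count (((m : Nat) : Int), j) : Nat) : Int)),
      ∃ j : Int, 0 ≤ j ∧ j < PySem.Int.floordiv (linhas.length : Int) K ∧
        y = (((pvOccF linhas K).count (((m : Nat) : Int), j) : Nat) : Int) := by
    intro y hy
    rw [List.mem_map] at hy
    obtain ⟨j, hj, rfl⟩ := hy
    obtain ⟨hj0, hjC⟩ := PySem.List.mem_pyRange_one.mp hj
    exact ⟨j, hj0, hjC, rfl⟩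
  have hcolne : (PySem.List.pyRange 0 (PySem.Int.floordiv (linhas.length : Int) K) 1).map
      (fun j => (((pvOccF linhas K).count (((m : Nat) : Int), j) : Nat) : Int)) ≠ [] := by
    apply List.ne_nil_of_length_pos
    rw [List.length_map, PySem.List.length_pyRange_one]
    omega
  have h1 : ∀ y ∈ (PySem.List.pyRange 0 (PySem.Int.floordiv (linhas.length : Int) K) 1).map
      (fun j => (((pvOccF linhas K).count (((m : Nat) : Int), j) : Nat) : Int)), 0 ≤ y := by
    intro y hy
    obtain ⟨j, _, _, rfl⟩ := hcolform y hy
    exact Int.natCast_nonneg _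
  have h2 : ∀ y ∈ (PySem.List.pyRange 0 (PySem.Int.floordiv (linhas.length : Int) K) 1).map
      (fun j => (((pvOccF linhas K).count (((m : Nat) : Int), j) : Nat) : Int)), 0 < y →
      y ∈ pvCounts linhas K (PySem.Int.floordiv (linhas.length : Int) K) ((m : Nat) : Int) := by
    intro y hy hpos
    obtain ⟨j, hj0, hjC, rfl⟩ := hcolform y hy
    have hcp : 0 < (pvOccF linhas K).count (((m : Nat) : Int), j) := by exact_mod_cast hpos
    exact hmemcounts j hj0 hjC (List.count_pos_iff.mp hcp)
  have h3 : ∀ y ∈ pvCounts linhas K (PySem.Int.floordiv (linhas.length : Int) K) ((m : Nat) : Int),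
      y ∈ (PySem.List.pyRange 0 (PySem.Int.floordiv (linhas.length : Int) K) 1).map
        (fun j => (((pvOccF linhas K).count (((m : Nat) : Int), j) : Nat) : Int)) ∧ 0 < y := by
    intro y hy
    obtain ⟨j, hj0, hjC, rfl, hmem⟩ := hcountsmem y hy
    constructor
    · rw [List.mem_map]
      exact ⟨j, PySem.List.mem_pyRange_one.mpr ⟨hj0, hjC⟩, rfl⟩
    · exact_mod_cast List.count_pos_iff.mpr hmem
  have emax := pvMax_eq _ _ hcolne h1 h2 h3
  rw [emax]
  -- the nodup list of full-block indices present for this value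
  have hnodupS : ((PySem.Set.ofList (pvOccF linhas K)).filter
      (fun k => k.1 == ((m : Nat) : Int) && decide (k.2 < PySem.Int.floordiv (linhas.length : Int) K))).Nodup :=
    List.Nodup.filter _ (PySem.Set.nodup_ofList _)
  have hnodupsnds : (((PySem.Set.ofList (pvOccF linhas K)).filter
      (fun k => k.1 == ((m : Nat) : Int) && decide (k.2 < PySem.Int.floordiv (linhas.length : Int) K))).map
        (fun k => k.2)).Nodup := by
    apply List.Nodup.map_on _ hnodupS
    intro x hx y hy hxy
    have hx1 := (hSmem x hx).1
    have hy1 := (hSmem y hy).1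
    exact Prod.ext (hx1.trans hy1.symm) hxy
  have hsndsub : (((PySem.Set.ofList (pvOccF linhas K)).filter
      (fun k => k.1 == ((m : Nat) : Int) && decide (k.2 < PySem.Int.floordiv (linhas.length : Int) K))).map
        (fun k => k.2)) ⊆ PySem.List.pyRange 0 (PySem.Int.floordiv (linhas.length : Int) K) 1 := by
    intro j hj
    rw [List.mem_map] at hj
    obtain ⟨k, hk, rfl⟩ := hj
    obtain ⟨_, hk2, hk3, _⟩ := hSmem k hk
    exact PySem.List.mem_pyRange_one.mpr ⟨hk2, hk3⟩
  have hlencounts : (pvCounts linhas K (PySem.Int.floordiv (linhas.length : Int) K) ((m : Nat) : Int)).length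
      = (((PySem.Set.ofList (pvOccF linhas K)).filter
          (fun k => k.1 == ((m : Nat) : Int) && decide (k.2 < PySem.Int.floordiv (linhas.length : Int) K))).map
            (fun k => k.2)).length := by
    unfold pvCounts
    rw [List.length_map, List.length_map]
  -- min component
  have emin : (match PySem.List.min? ((PySem.List.pyRange 0 (PySem.Int.floordiv (linhas.length : Int) K) 1).map
        (fun j => (((pvOccF linhas K).count (((m : Nat) : Int), j) : Nat) : Int))) (fun x => x) with
        | some mv => mv | none => 0)
      = (if pvCounts linhas K (PySem.Int.floordiv (linhas.length : Int) K) ((m : Nat) : Int) ≠ [] ∧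
            ((pvCounts linhas K (PySem.Int.floordiv (linhas.length : Int) K) ((m : Nat) : Int)).length : Int)
              = PySem.Int.floordiv (linhas.length : Int) K then
          (match PySem.List.min? (pvCounts linhas K (PySem.Int.floordiv (linhas.length : Int) K) ((m : Nat) : Int))
            (fun x => x) with
            | some mv => mv | none => 0)
        else 0) := by
    by_cases hg : pvCounts linhas K (PySem.Int.floordiv (linhas.length : Int) K) ((m : Nat) : Int) ≠ [] ∧
        ((pvCounts linhas K (PySem.Int.floordiv (linhas.length : Int) K) ((m : Nat) : Int)).length : Int)
          = PySem.Int.floordiv (linhas.length : Int) K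
    · rw [if_pos hg]
      have hlen : (((PySem.Set.ofList (pvOccF linhas K)).filter
          (fun k => k.1 == ((m : Nat) : Int) && decide (k.2 < PySem.Int.floordiv (linhas.length : Int) K))).map
            (fun k => k.2)).length
          = (PySem.List.pyRange 0 (PySem.Int.floordiv (linhas.length : Int) K) 1).length := by
        rw [PySem.List.length_pyRange_one]
        have := hg.2
        rw [hlencounts] at this
        omega
      have hperm : (((PySem.Set.ofList (pvOccF linhas K)).filter
          (fun k => k.1 == ((m : Nat) : Int) && decide (k.2 < PySem.Int.floordiv (linhas.length : Int) K))).map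
            (fun k => k.2)).Perm (PySem.List.pyRange 0 (PySem.Int.floordiv (linhas.length : Int) K) 1) :=
        (hnodupsnds.subperm hsndsub).perm_of_length_le (le_of_eq hlen.symm)
      apply pvMin_full _ _ hcolne hg.1
      · intro y hy
        obtain ⟨j, hj0, hjC, rfl⟩ := hcolform y hy
        have hjsnds : j ∈ (((PySem.Set.ofList (pvOccF linhas K)).filter
            (fun k => k.1 == ((m : Nat) : Int) && decide (k.2 < PySem.Int.floordiv (linhas.length : Int) K))).map
              (fun k => k.2)) :=
          hperm.mem_iff.mpr (PySem.List.mem_pyRange_one.mpr ⟨hj0, hjC⟩)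
        rw [List.mem_map] at hjsnds
        obtain ⟨k, hk, hkj⟩ := hjsnds
        have hk1 := (hSmem k hk).1
        unfold pvCounts
        rw [List.mem_map]
        refine ⟨k, hk, ?_⟩
        rw [show k = ((((m : Nat) : Int)), j) from Prod.ext hk1 hkj]
      · intro y hy
        exact (h3 y hy).1
    · rw [if_neg hg]
      by_cases hcn : pvCounts linhas K (PySem.Int.floordiv (linhas.length : Int) K) ((m : Nat) : Int) = []
      · have hc0 : (((pvOccF linhas K).count (((m : Nat) : Int), (0 : Int)) : Nat) : Int) = 0 := by
          by_contra hne2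
          have hpos : (0 : Int) < (((pvOccF linhas K).count (((m : Nat) : Int), (0 : Int)) : Nat) : Int) := by
            have := Int.natCast_nonneg ((pvOccF linhas K).count (((m : Nat) : Int), (0 : Int)))
            omega
          have := h2 _ (List.mem_map.mpr ⟨0, PySem.List.mem_pyRange_one.mpr ⟨le_refl 0, hCpos⟩, rfl⟩) hpos
          rw [hcn] at this
          exact absurd this List.not_mem_nil
        exact pvMin_zero _ h1
          (List.mem_map.mpr ⟨0, PySem.List.mem_pyRange_one.mpr ⟨le_refl 0, hCpos⟩, hc0⟩)
      · have hlenne : ((pvCounts linhas K (PySem.Int.floordiv (linhas.length : Int) K) ((m : Nat) : Int)).length : Int)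
            ≠ PySem.Int.floordiv (linhas.length : Int) K := by tauto
        have hlenle : (((PySem.Set.ofList (pvOccF linhas K)).filter
            (fun k => k.1 == ((m : Nat) : Int) && decide (k.2 < PySem.Int.floordiv (linhas.length : Int) K))).map
              (fun k => k.2)).length ≤ (PySem.List.pyRange 0 (PySem.Int.floordiv (linhas.length : Int) K) 1).length :=
          (hnodupsnds.subperm hsndsub).length_le
        obtain ⟨j, hjr, hjns⟩ : ∃ j ∈ PySem.List.pyRange 0 (PySem.Int.floordiv (linhas.length : Int) K) 1,
            j ∉ (((PySem.Set.ofList (pvOccF linhas K)).filter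
              (fun k => k.1 == ((m : Nat) : Int) && decide (k.2 < PySem.Int.floordiv (linhas.length : Int) K))).map
                (fun k => k.2)) := by
          by_contra hall
          push_neg at hall
          have hsub2 : PySem.List.pyRange 0 (PySem.Int.floordiv (linhas.length : Int) K) 1 ⊆
              (((PySem.Set.ofList (pvOccF linhas K)).filter
                (fun k => k.1 == ((m : Nat) : Int) && decide (k.2 < PySem.Int.floordiv (linhas.length : Int) K))).map
                  (fun k => k.2)) := fun j hj => hall j hj
          have hge := ((PySem.List.nodup_pyRange_one 0 (PySem.Int.floordiv (linhas.length : Int) K)).subperm hsub2).length_le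
          rw [PySem.List.length_pyRange_one] at hlenle hge
          rw [hlencounts] at hlenne
          omega
        obtain ⟨hj0, hjC⟩ := PySem.List.mem_pyRange_one.mp hjr
        have hc0 : (((pvOccF linhas K).count (((m : Nat) : Int), j) : Nat) : Int) = 0 := by
          by_contra hne2
          have hpos : 0 < (pvOccF linhas K).count (((m : Nat) : Int), j) := by
            have := Int.natCast_nonneg ((pvOccF linhas K).count (((m : Nat) : Int), j))
            omega
          have hmem := List.count_pos_iff.mp hpos
          apply hjns
          rw [List.mem_map]
          refine ⟨((((m : Nat) : Int)), j), ?_, rfl⟩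
          rw [List.mem_filter]
          exact ⟨(PySem.Set.mem_ofList _ _).mpr hmem, by simp [hjC]⟩
        exact pvMin_zero _ h1 (List.mem_map.mpr ⟨j, hjr, hc0⟩)
  rw [emin]
  -- third component
  have hinc := pvInc_eq linhas K hK ((m : Nat) : Int)
  by_cases hr : (linhas.length : Int) - PySem.Int.floordiv (linhas.length : Int) K * K > 0
  · rw [if_pos hr, if_pos hr, if_pos hr, PySem.List.pyGetD_natCast, pvHistRange_getD linhas _ _ m hm99,
      ← pvCO_rem linhas K ((m : Nat) : Int) hK hn0 (by omega), ← hinc]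
  · rw [if_neg hr, if_neg hr]

set_option maxHeartbeats 1600000 in
theorem pvCase_neg (linhas : List (List Int)) (K : Int) (hK : K < 0) :
    analise_por_bloco linhas K = analise_por_bloco_alt linhas K := by
  rcases eq_or_ne linhas [] with rfl | hne
  · -- no rows: both sides are (0, 0, all-zero triples)
    simp only [analise_por_bloco, analise_por_bloco_alt, List.length_nil, Nat.cast_zero,
      pvFd0 K (ne_of_lt hK), zero_mul, sub_zero, reduceIte, gt_iff_lt, lt_self_iff_false, if_false]
    have hr0 : PySem.List.pyRange (0 : Int) 0 1 = [] := PySem.List.pyRange_one_eq_nil (le_refl 0)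
    refine congrArg (fun z : PySem.Dict Int (Int × Int × Int) => ((0 : Int), ((0 : Int), z.items))) ?_
    apply PySem.List.foldl_congr_mem
    intro d n hn
    apply congrArg
    rw [hr0, List.foldl_nil]
    rfl
  · have hN : 0 < (linhas.length : Int) := by
      have := List.length_pos_of_ne_nil hne
      omega
    have hmul := PySem.Int.floordiv_mul_add_mod (linhas.length : Int) K
    have hmb := PySem.Int.mod_neg_bounds (linhas.length : Int) hK
    have hCneg : PySem.Int.floordiv (linhas.length : Int) K < 0 := by
      rcases lt_trichotomy (PySem.Int.floordiv (linhas.length : Int) K) 0 with h | h | h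
      · exact h
      · rw [h] at hmul
        omega
      · nlinarith
    have hC : ¬ PySem.Int.floordiv (linhas.length : Int) K = 0 := by omega
    have hr : ¬ ((linhas.length : Int) - PySem.Int.floordiv (linhas.length : Int) K * K > 0) := by omega
    have hb : PySem.List.pyRange 0 (PySem.Int.floordiv (linhas.length : Int) K) 1 = [] :=
      PySem.List.pyRange_one_eq_nil (le_of_lt hCneg)
    simp only [analise_por_bloco, analise_por_bloco_alt, if_neg hC, hb, List.foldl_nil,
      List.map_nil, gt_iff_lt, hr, if_false]
    refine congrArg (fun z : PySem.Dict Int (Int × Int × Int) =>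
      (PySem.Int.floordiv (linhas.length : Int) K,
        ((linhas.length : Int) - PySem.Int.floordiv (linhas.length : Int) K * K, z.items))) ?_
    apply PySem.List.foldl_congr_mem
    intro d n hn
    apply congrArg
    -- B's counts list is empty: no occurrence pair has block index < C (< 0)
    have hcnil : pvCounts linhas K (PySem.Int.floordiv (linhas.length : Int) K) n = [] := by
      unfold pvCounts
      rw [List.filter_eq_nil_iff.mpr, List.map_nil]
      intro k hk
      have h2 := pvOcc_snd_neg linhas K hK k ((PySem.Set.mem_ofList _ _).mp hk)
      simp only [Bool.and_eq_true, beq_iff_eq, decide_eq_true_eq, not_and]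
      intro _
      exact h2
    rw [pvPer_eq, hcnil]
    rfl

-- ===== VERDICT (by name: the statement is the Claim_ definition above) =====
theorem analise_por_bloco_spec : Claim_equal_analise_por_bloco := by
  intro linhas K hdom hK
  unfold Spec_analise_por_bloco
  rcases lt_trichotomy K 0 with hKn | hK0 | hKp
  · exact pvCase_neg linhas K hKn
  · exact absurd hK0 hK
  · by_cases hC : PySem.Int.floordiv (linhas.length : Int) K = 0
    · exact pvCase_C0 linhas K hKp hC
    · exact pvCase_pos linhas K hKp hC
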